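-- pv_equiv track=rewrite | github.com/rafaelcabralviana/entrader | trader/panel_context.py | _status_column_index
-- ===== SOURCE A (Python) =====
-- def _status_column_index(keys: list[str]) -> int | None:
--     """Índice da coluna de status da ordem (para ícone + legenda)."""
--     priority_map = {
--         'orderstatus': 0,
--         'status': 1,
--         'orderstate': 2,
--         'state': 3,
--     }
--     best: tuple[int, int] | None = None
--     for i, k in enumerate(keys):
--         nk = (k or '').strip().lower().replace('_', '')
--         if nk in priority_map:
--             p = priority_map[nk]
--             if best is None or p < best[0]:
--                 best = (p, i)
--     if best is not None:
--         return best[1]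
--     for i, k in enumerate(keys):
--         if 'status' in (k or '').lower():
--             return i
--     return None
-- ===== SOURCE B (Python) =====
-- def _status_column_index(keys: list[str]) -> int | None:
--     """Índice da coluna de status da ordem (para ícone + legenda)."""
--     def norm(k):
--         return (k or '').strip().lower().replace('_', '')
--     for name in ('orderstatus', 'status', 'orderstate', 'state'):
--         for i, k in enumerate(keys):
--             if norm(k) == name:
--                 return i
--     for i, k in enumerate(keys):
--         if 'status' in (k or '').lower():
--             return i
--     return None
-- ===== Notes on version B (the rewrite author's own statement) =====
-- stated objective: idiomatic
-- what changed: Replaces the single-pass (priority,index) min-tracking fold over a priority dict by nested loops: try each priority name in order and return the first key index whose normalized form equals it, then the substring fallback.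
import Mathlib
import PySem

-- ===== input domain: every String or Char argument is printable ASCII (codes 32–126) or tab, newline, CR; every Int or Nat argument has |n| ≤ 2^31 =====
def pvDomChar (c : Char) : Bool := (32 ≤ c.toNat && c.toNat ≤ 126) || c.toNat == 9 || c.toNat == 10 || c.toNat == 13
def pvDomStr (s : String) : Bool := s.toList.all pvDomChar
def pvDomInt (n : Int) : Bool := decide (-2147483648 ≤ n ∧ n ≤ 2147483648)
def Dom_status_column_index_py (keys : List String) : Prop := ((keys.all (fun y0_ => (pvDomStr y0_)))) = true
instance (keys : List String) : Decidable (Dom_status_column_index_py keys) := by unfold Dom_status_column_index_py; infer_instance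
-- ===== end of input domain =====

set_option maxHeartbeats 1600000


-- B replaces A's single-pass (priority, index) min-tracking fold by nested loops over the
-- priority names in order (objective: idiomatic decomposition; same O(n) cost).
-- '(k or "")' in the Python equals k itself for a string argument, so both ports use k directly.

-- ===== PORT A =====
-- the dict literal and the loop body of A, named so the lemmas below can refer to them
def pvPriorityMap : PySem.Dict String Int :=
  PySem.Dict.ofList [("orderstatus", 0), ("status", 1), ("orderstate", 2), ("state", 3)]

def pvStep (best : Option (Int × Int)) (ik : Int × String) : Option (Int × Int) :=
  let nk := PySem.Str.replace (PySem.Str.lower (PySem.Str.strip ik.2)) "_" ""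
  -- 'nk in priority_map' then 'priority_map[nk]' = match on get?
  match pvPriorityMap.get? nk with
  | some p =>
    match best with
    | none => some (p, ik.1)
    | some b => if p < b.1 then some (p, ik.1) else some b
  | none => best

def status_column_index_py (keys : List String) : Option Int :=
  let best : Option (Int × Int) := (PySem.List.enumerate keys 0).foldl pvStep none
  match best with
  | some b => some b.2
  | none =>
    -- early-return loop = find? over the enumerated list
    match (PySem.List.enumerate keys 0).find?
        (fun ik => PySem.Str.isIn "status" (PySem.Str.lower ik.2)) with
    | some ik => some ik.1
    | none => none

-- ===== PORT B =====
def pvNames : List String := ["orderstatus", "status", "orderstate", "state"]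

def pvNorm (k : String) : String :=
  PySem.Str.replace (PySem.Str.lower (PySem.Str.strip k)) "_" ""

def pvFindName (name : String) : List String → Int → Option Int
  | [], _ => none
  | k :: rest, i => if pvNorm k == name then some i else pvFindName name rest (i + 1)

def pvFindSub : List String → Int → Option Int
  | [], _ => none
  | k :: rest, i =>
    if PySem.Str.isIn "status" (PySem.Str.lower k) then some i else pvFindSub rest (i + 1)

def status_column_index_py_alt (keys : List String) : Option Int :=
  match pvNames.findSome? (fun n => pvFindName n keys 0) with
  | some i => some i
  | none => pvFindSub keys 0

-- ===== PRECONDITION & SPEC =====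
def Spec_status_column_index_py (keys : List String) (out : Option Int) : Prop := out = status_column_index_py_alt keys
instance (keys : List String) (out : Option Int) : Decidable (Spec_status_column_index_py keys out) := by unfold Spec_status_column_index_py; infer_instance

-- ===== CLAIM (what is proved, stated in full; the proofs are below) =====
def Claim_equal_status_column_index_py : Prop := ∀ (keys : List String), Dom_status_column_index_py keys → Spec_status_column_index_py keys (status_column_index_py keys)

-- ===== LEMMAS AND PROOFS =====

def nameOf (p : Int) : String :=
  if p = 0 then "orderstatus" else if p = 1 then "status" else if p = 2 then "orderstate" else "state"

theorem pm_get (s : String) : pvPriorityMap.get? s =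
    if s == "orderstatus" then some 0 else if s == "status" then some 1
    else if s == "orderstate" then some 2 else if s == "state" then some 3 else none := by
  have h : pvPriorityMap = PySem.Dict.mk [("orderstatus", 0), ("status", 1), ("orderstate", 2), ("state", 3)] := by decide
  rw [h]
  by_cases h1 : s = "orderstatus"
  · subst h1; decide
  by_cases h2 : s = "status"
  · subst h2; decide
  by_cases h3 : s = "orderstate"
  · subst h3; decide
  by_cases h4 : s = "state"
  · subst h4; decide
  simp only [PySem.Dict.get?_mk_cons, beq_iff_eq, if_neg (Ne.symm h1), if_neg (Ne.symm h2),
    if_neg (Ne.symm h3), if_neg (Ne.symm h4), if_neg h1, if_neg h2, if_neg h3, if_neg h4]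
  rfl

-- classification of pvPriorityMap.get? s
theorem pm_cases (s : String) :
    (pvPriorityMap.get? s = none ∧ ∀ n ∈ pvNames, s ≠ n) ∨
    (∃ p, pvPriorityMap.get? s = some p ∧ 0 ≤ p ∧ p < 4 ∧ s = nameOf p) := by
  rw [pm_get]
  by_cases h1 : s = "orderstatus"
  · right; exact ⟨0, by simp [h1, nameOf]⟩
  by_cases h2 : s = "status"
  · right; refine ⟨1, ?_⟩; simp [h2, nameOf]
  by_cases h3 : s = "orderstate"
  · right; refine ⟨2, ?_⟩; simp [h3, nameOf]
  by_cases h4 : s = "state"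
  · right; refine ⟨3, ?_⟩; simp [h4, nameOf]
  left
  constructor
  · simp [h1, h2, h3, h4]
  · intro n hn
    simp only [pvNames, List.mem_cons, List.not_mem_nil, or_false] at hn
    rcases hn with rfl | rfl | rfl | rfl <;> assumption

theorem nameOf_mem (q : Int) (h0 : 0 ≤ q) (h4 : q < 4) : nameOf q ∈ pvNames := by
  interval_cases q <;> decide

theorem nameOf_ne (p q : Int) (hp0 : 0 ≤ p) (hp4 : p < 4) (hq0 : 0 ≤ q) (hq4 : q < 4)
    (hne : p ≠ q) : nameOf p ≠ nameOf q := by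
  interval_cases p <;> interval_cases q <;> simp_all <;> decide

-- proof-side recursion computing A's fold result
def pvMrec : List String → Int → Option (Int × Int)
  | [], _ => none
  | k :: rest, i =>
    match pvPriorityMap.get? (pvNorm k) with
    | none => pvMrec rest (i + 1)
    | some p =>
      match pvMrec rest (i + 1) with
      | none => some (p, i)
      | some x => if x.1 < p then some x else some (p, i)

theorem fold_eq (keys : List String) : ∀ (i : Int) (best : Option (Int × Int)),
    (PySem.List.enumerate keys i).foldl pvStep best =
      match pvMrec keys i, best with
      | none, b => b
      | some x, none => some x
      | some x, some b => if x.1 < b.1 then some x else some b := by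
  induction keys with
  | nil =>
    intro i best
    rw [PySem.List.enumerate_nil, List.foldl_nil]
    cases best <;> rfl
  | cons k rest ih =>
    intro i best
    rw [PySem.List.enumerate_cons, List.foldl_cons, ih]
    show (match pvMrec rest (i+1), pvStep best (i, k) with
      | none, b => b | some x, none => some x
      | some x, some b => if x.1 < b.1 then some x else some b) = _
    simp only [pvMrec, pvStep, pvNorm]
    cases hpk : pvPriorityMap.get? (PySem.Str.replace (PySem.Str.lower (PySem.Str.strip k)) "_" "") with
    | none => cases pvMrec rest (i + 1) <;> cases best <;> rfl
    | some p =>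
      cases hm : pvMrec rest (i + 1) with
      | none => cases best <;> simp
      | some x =>
        cases best with
        | none => simp only []; split_ifs <;> rfl
        | some b =>
          simp only []
          by_cases h1 : x.1 < p <;> by_cases h2 : p < b.1 <;> by_cases h3 : x.1 < b.1 <;>
            first | (exfalso; omega) | simp [h1, h2, h3]

-- pvMrec vs. per-name scans of B
theorem mrec_char (keys : List String) : ∀ (i : Int),
    (pvMrec keys i = none ∧ ∀ n ∈ pvNames, pvFindName n keys i = none) ∨
    (∃ p j, pvMrec keys i = some (p, j) ∧ 0 ≤ p ∧ p < 4 ∧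
      pvFindName (nameOf p) keys i = some j ∧
      ∀ q, 0 ≤ q → q < p → pvFindName (nameOf q) keys i = none) := by
  induction keys with
  | nil => intro i; left; exact ⟨rfl, fun n _ => rfl⟩
  | cons k rest ih =>
    intro i
    rcases pm_cases (pvNorm k) with ⟨hnone, hnot⟩ | ⟨p, hsome, hp0, hp4, hk⟩
    · -- k matches no priority name
      have hstep : ∀ n ∈ pvNames, pvFindName n (k :: rest) i = pvFindName n rest (i + 1) := by
        intro n hn
        simp only [pvFindName, beq_iff_eq, if_neg (hnot n hn)]
      rcases ih (i + 1) with ⟨hm, hall⟩ | ⟨p, j, hm, hp0, hp4, hfind, hlt⟩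
      · left
        refine ⟨?_, fun n hn => (hstep n hn).trans (hall n hn)⟩
        simp [pvMrec, hnone, hm]
      · right
        refine ⟨p, j, ?_, hp0, hp4, ?_, ?_⟩
        · simp [pvMrec, hnone, hm]
        · exact (hstep _ (nameOf_mem p hp0 hp4)).trans hfind
        · intro q hq0 hqp
          exact (hstep _ (nameOf_mem q hq0 (by omega))).trans (hlt q hq0 hqp)
    · -- k matches nameOf p
      have hself : pvFindName (nameOf p) (k :: rest) i = some i := by
        simp [pvFindName, hk]
      have hother : ∀ q, 0 ≤ q → q < 4 → q ≠ p →
          pvFindName (nameOf q) (k :: rest) i = pvFindName (nameOf q) rest (i + 1) := by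
        intro q hq0 hq4 hqp
        have : pvNorm k ≠ nameOf q := by
          rw [hk]; exact nameOf_ne p q hp0 hp4 hq0 hq4 (Ne.symm hqp)
        simp only [pvFindName, beq_iff_eq, if_neg this]
      rcases ih (i + 1) with ⟨hm, hall⟩ | ⟨p', j', hm, hp'0, hp'4, hfind, hlt⟩
      · right
        refine ⟨p, i, ?_, hp0, hp4, hself, ?_⟩
        · simp [pvMrec, hsome, hm]
        · intro q hq0 hqp
          rw [hother q hq0 (by omega) (by omega)]
          exact hall _ (nameOf_mem q hq0 (by omega))
      · by_cases hcmp : p' < p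
        · right
          refine ⟨p', j', ?_, hp'0, hp'4, ?_, ?_⟩
          · simp [pvMrec, hsome, hm, hcmp]
          · rw [hother p' hp'0 hp'4 (by omega)]; exact hfind
          · intro q hq0 hqp'
            rw [hother q hq0 (by omega) (by omega)]
            exact hlt q hq0 hqp'
        · right
          refine ⟨p, i, ?_, hp0, hp4, hself, ?_⟩
          · simp [pvMrec, hsome, hm, hcmp]
          · intro q hq0 hqp
            rw [hother q hq0 (by omega) (by omega)]
            exact hlt q hq0 (by omega)

-- the fallback loops agree
theorem fallback_eq (keys : List String) : ∀ (i : Int),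
    (match (PySem.List.enumerate keys i).find?
        (fun ik => PySem.Str.isIn "status" (PySem.Str.lower ik.2)) with
      | some ik => some ik.1
      | none => none) = pvFindSub keys i := by
  induction keys with
  | nil => intro i; rw [PySem.List.enumerate_nil]; rfl
  | cons k rest ih =>
    intro i
    rw [PySem.List.enumerate_cons, List.find?_cons]
    cases h : PySem.Str.isIn "status" (PySem.Str.lower k) with
    | true => simp only [pvFindSub, h, if_true]
    | false => simp only [pvFindSub, h, Bool.false_eq_true, if_false]; exact ih (i + 1)

-- phase 1 of B in terms of pvMrec
theorem phase1 (keys : List String) :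
    pvNames.findSome? (fun n => pvFindName n keys 0) =
      match pvMrec keys 0 with
      | some x => some x.2
      | none => none := by
  rcases mrec_char keys 0 with ⟨hm, hall⟩ | ⟨p, j, hm, hp0, hp4, hfind, hlt⟩
  · rw [hm]
    have h0 := hall _ (show "orderstatus" ∈ pvNames by decide)
    have h1 := hall _ (show "status" ∈ pvNames by decide)
    have h2 := hall _ (show "orderstate" ∈ pvNames by decide)
    have h3 := hall _ (show "state" ∈ pvNames by decide)
    simp [pvNames, h0, h1, h2, h3]
  · rw [hm]
    interval_cases p
    · have hf := hfind
      norm_num [nameOf] at hf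
      simp [pvNames, hf]
    · have hf := hfind
      have h0 := hlt 0 (by omega) (by omega)
      norm_num [nameOf] at hf h0
      simp [pvNames, hf, h0]
    · have hf := hfind
      have h0 := hlt 0 (by omega) (by omega)
      have h1 := hlt 1 (by omega) (by omega)
      norm_num [nameOf] at hf h0 h1
      simp [pvNames, hf, h0, h1]
    · have hf := hfind
      have h0 := hlt 0 (by omega) (by omega)
      have h1 := hlt 1 (by omega) (by omega)
      have h2 := hlt 2 (by omega) (by omega)
      norm_num [nameOf] at hf h0 h1 h2
      simp [pvNames, hf, h0, h1, h2]

-- ===== VERDICT (by name: the statement is the Claim_ definition above) =====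
theorem status_column_index_py_spec : Claim_equal_status_column_index_py := by
  intro keys _
  show status_column_index_py keys = status_column_index_py_alt keys
  simp only [status_column_index_py, status_column_index_py_alt]
  rw [fold_eq keys 0 none, phase1 keys]
  cases pvMrec keys 0 with
  | some x => rfl
  | none =>
    show (match (PySem.List.enumerate keys 0).find?
        (fun ik => PySem.Str.isIn "status" (PySem.Str.lower ik.2)) with
      | some ik => some ik.1
      | none => none) = pvFindSub keys 0
    exact fallback_eq keys 0
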